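-- pv_equiv track=rewrite | github.com/Vitek-123/mobilki | python/product_merger.py | merge_products_alternating
-- ===== SOURCE A (Python) =====
-- from typing import List, Dict
--
-- def merge_products_alternating(
--     external_products: List[Dict],
--     db_products: List[Dict],
--     static_products: List[Dict] = None
-- ) -> List[Dict]:
--     """
--     Объединение товаров из разных источников с чередованием
--
--     Алгоритм чередования:
--     1. Берем товар из внешнего источника
--     2. Берем товар из БД
--     3. Берем товар из статических (если есть)
--     4. Повторяем цикл
--
--     Args:
--         external_products: Товары из внешнего источника
--         db_products: Товары из базы данных
--         static_products: Статические товары (опционально)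
--
--     Returns:
--         Объединенный список товаров с чередованием
--     """
--     if static_products is None:
--         static_products = []
--
--     merged = []
--
--     # Индексы для каждого источника
--     external_idx = 0
--     db_idx = 0
--     static_idx = 0
--
--     # Чередуем товары: внешний источник -> БД -> Статические -> повтор
--     while external_idx < len(external_products) or db_idx < len(db_products) or static_idx < len(static_products):
--         if external_idx < len(external_products):
--             merged.append(external_products[external_idx])
--             external_idx += 1
--
--         if db_idx < len(db_products):
--             merged.append(db_products[db_idx])
--             db_idx += 1
--
--         if static_idx < len(static_products):
--             merged.append(static_products[static_idx])
--             static_idx += 1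
--
--     return merged
-- ===== SOURCE B (Python) =====
-- def merge_products_alternating(external_products, db_products, static_products=None):
--     if static_products is None:
--         static_products = []
--     e, d, s = external_products, db_products, static_products
--     m3 = min(len(e), len(d), len(s))
--     out = [x for t in zip(e, d, s) for x in t]
--     rem = [l for l in (e[m3:], d[m3:], s[m3:]) if l]
--     if len(rem) == 2:
--         a, b = rem
--         m2 = min(len(a), len(b))
--         out += [x for t in zip(a, b) for x in t]
--         out += a[m2:] + b[m2:]
--     elif len(rem) == 1:
--         out += rem[0]
--     return out
-- ===== Notes on version B (the rewrite author's own statement) =====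
-- stated objective: alternative
-- what changed: Replaces A's manual three-index round-robin while loop by a staged slicing algorithm: zip3-flatten the common prefix of the three lists, then zip2-flatten the two surviving tails, then append the single remaining tail.
import Mathlib
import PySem

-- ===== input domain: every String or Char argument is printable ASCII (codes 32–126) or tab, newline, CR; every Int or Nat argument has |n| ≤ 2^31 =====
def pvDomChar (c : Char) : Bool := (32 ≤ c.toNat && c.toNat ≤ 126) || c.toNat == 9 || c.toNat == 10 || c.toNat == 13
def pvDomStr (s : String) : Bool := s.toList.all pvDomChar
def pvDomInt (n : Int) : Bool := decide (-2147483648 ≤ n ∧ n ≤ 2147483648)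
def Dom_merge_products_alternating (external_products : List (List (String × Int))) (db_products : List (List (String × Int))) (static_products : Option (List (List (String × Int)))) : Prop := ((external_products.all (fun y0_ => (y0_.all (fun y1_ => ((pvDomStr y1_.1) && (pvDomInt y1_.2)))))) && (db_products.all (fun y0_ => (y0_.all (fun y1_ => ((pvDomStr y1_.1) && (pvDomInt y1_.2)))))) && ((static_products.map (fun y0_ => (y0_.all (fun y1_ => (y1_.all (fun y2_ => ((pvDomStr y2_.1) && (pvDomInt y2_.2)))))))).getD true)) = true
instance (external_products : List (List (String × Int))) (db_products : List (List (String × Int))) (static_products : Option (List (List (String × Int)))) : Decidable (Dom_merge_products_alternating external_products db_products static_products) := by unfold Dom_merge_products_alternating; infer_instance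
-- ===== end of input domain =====

-- B replaces A's manual three-index round-robin while loop by a staged slicing algorithm
-- (zip3 the common prefix, then zip2 the two surviving tails, then the single remainder);
-- alternative decomposition, same O(n) cost.

-- ===== PORT A =====
-- the while loop: indices into each source, append from each source while its index is in range;
-- fuel = total remaining elements bounds the iteration count (the loop consumes >= 1 element per round)
def mergeLoopA (e d s : List (List (String × Int))) (fuel : Nat) (i j k : Nat) (merged : List (List (String × Int))) : List (List (String × Int)) :=
  match fuel with
  | 0 => merged
  | Nat.succ fuel =>
    if i < e.length ∨ j < d.length ∨ k < s.length then
      mergeLoopA e d s fuel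
        (if i < e.length then i + 1 else i)
        (if j < d.length then j + 1 else j)
        (if k < s.length then k + 1 else k)
        (((merged ++ (if i < e.length then [e.getD i []] else []))
                 ++ (if j < d.length then [d.getD j []] else []))
                 ++ (if k < s.length then [s.getD k []] else []))
    else merged

def merge_products_alternating (external_products : List (List (String × Int))) (db_products : List (List (String × Int))) (static_products : Option (List (List (String × Int)))) : List (List (String × Int)) :=
  let s := static_products.getD []
  mergeLoopA external_products db_products s
    (external_products.length + db_products.length + s.length) 0 0 0 []

-- ===== PORT B =====
-- staged: zip3-flatten the common prefix, then the (at most two) nonempty tails: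
-- zip2-flatten, then whichever tail remains
def merge_products_alternating_alt (external_products : List (List (String × Int))) (db_products : List (List (String × Int))) (static_products : Option (List (List (String × Int)))) : List (List (String × Int)) :=
  let s := static_products.getD []
  let e := external_products
  let d := db_products
  let m3 := min (min e.length d.length) s.length
  let out := (e.zip (d.zip s)).flatMap (fun t => [t.1, t.2.1, t.2.2])
  let rem := [e.drop m3, d.drop m3, s.drop m3].filter (fun l => !l.isEmpty)
  match rem with
  | [a, b] =>
      let m2 := min a.length b.length
      (out ++ (a.zip b).flatMap (fun t => [t.1, t.2])) ++ (a.drop m2 ++ b.drop m2)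
  | [a] => out ++ a
  | _ => out

-- ===== PRECONDITION & SPEC =====
def Spec_merge_products_alternating (external_products : List (List (String × Int))) (db_products : List (List (String × Int))) (static_products : Option (List (List (String × Int)))) (out : List (List (String × Int))) : Prop := out = merge_products_alternating_alt external_products db_products static_products
instance (external_products : List (List (String × Int))) (db_products : List (List (String × Int))) (static_products : Option (List (List (String × Int)))) (out : List (List (String × Int))) : Decidable (Spec_merge_products_alternating external_products db_products static_products out) := by unfold Spec_merge_products_alternating; infer_instance

-- ===== CLAIM (what is proved, stated in full; the proofs are below) =====
def Claim_equal_merge_products_alternating : Prop := ∀ (external_products : List (List (String × Int))) (db_products : List (List (String × Int))) (static_products : Option (List (List (String × Int)))), Dom_merge_products_alternating external_products db_products static_products → Spec_merge_products_alternating external_products db_products static_products (merge_products_alternating external_products db_products static_products)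

-- ===== LEMMAS AND PROOFS =====

-- proof-only intermediate: one Option slot per source per round (none = exhausted);
-- fuel bounds the number of rounds
def zipLongest3 (fuel : Nat) (a b c : List (List (String × Int))) : List (Option (List (String × Int)) × Option (List (String × Int)) × Option (List (String × Int))) :=
  match fuel with
  | 0 => []
  | Nat.succ fuel =>
    if a = [] ∧ b = [] ∧ c = [] then []
    else (a.head?, b.head?, c.head?) :: zipLongest3 fuel a.tail b.tail c.tail

def flat3 (l : List (Option (List (String × Int)) × Option (List (String × Int)) × Option (List (String × Int)))) : List (List (String × Int)) :=
  l.flatMap (fun t => t.1.toList ++ t.2.1.toList ++ t.2.2.toList)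

-- A's loop computes the round-by-round flatten (invariant over the three indices)
theorem mergeLoopA_eq (e d s : List (List (String × Int))) :
    ∀ (fuel i j k : Nat) (acc : List (List (String × Int))),
      (e.length - i) + (d.length - j) + (s.length - k) ≤ fuel →
      mergeLoopA e d s fuel i j k acc
        = acc ++ flat3 (zipLongest3 fuel (e.drop i) (d.drop j) (s.drop k)) := by
  intro fuel
  induction fuel with
  | zero => intro i j k acc _; simp [mergeLoopA, zipLongest3, flat3]
  | succ fuel ih =>
    intro i j k acc hf
    by_cases h : i < e.length ∨ j < d.length ∨ k < s.length
    · have hdE : e.drop (if i < e.length then i + 1 else i) = (e.drop i).tail := by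
        split_ifs with hi
        · rw [List.tail_drop]
        · rw [List.drop_eq_nil_iff.2 (show e.length ≤ i by omega)]; rfl
      have hdD : d.drop (if j < d.length then j + 1 else j) = (d.drop j).tail := by
        split_ifs with hj
        · rw [List.tail_drop]
        · rw [List.drop_eq_nil_iff.2 (show d.length ≤ j by omega)]; rfl
      have hdS : s.drop (if k < s.length then k + 1 else k) = (s.drop k).tail := by
        split_ifs with hk
        · rw [List.tail_drop]
        · rw [List.drop_eq_nil_iff.2 (show s.length ≤ k by omega)]; rfl
      have hhE : (if i < e.length then [e.getD i []] else []) = ((e.drop i).head?).toList := by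
        rw [List.head?_drop]
        split_ifs with hi
        · simp [List.getD_eq_getElem?_getD, List.getElem?_eq_getElem hi]
        · simp [List.getElem?_eq_none_iff.2 (show e.length ≤ i by omega)]
      have hhD : (if j < d.length then [d.getD j []] else []) = ((d.drop j).head?).toList := by
        rw [List.head?_drop]
        split_ifs with hj
        · simp [List.getD_eq_getElem?_getD, List.getElem?_eq_getElem hj]
        · simp [List.getElem?_eq_none_iff.2 (show d.length ≤ j by omega)]
      have hhS : (if k < s.length then [s.getD k []] else []) = ((s.drop k).head?).toList := by
        rw [List.head?_drop]
        split_ifs with hk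
        · simp [List.getD_eq_getElem?_getD, List.getElem?_eq_getElem hk]
        · simp [List.getElem?_eq_none_iff.2 (show s.length ≤ k by omega)]
      rw [mergeLoopA, if_pos h,
        ih _ _ _ _ (by split_ifs <;> omega)]
      conv_rhs => rw [zipLongest3,
        if_neg (by simp only [List.drop_eq_nil_iff]; omega)]
      rw [hdE, hdD, hdS]
      simp only [flat3, List.flatMap_cons, ← hhE, ← hhD, ← hhS, List.append_assoc]
    · rw [mergeLoopA, if_neg h]
      conv_rhs => rw [zipLongest3,
        if_pos (by simp only [List.drop_eq_nil_iff]; omega)]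
      simp [flat3]

-- single-source rounds yield the source itself
theorem flat3_single1 : ∀ (fuel : Nat) (a : List (List (String × Int))), a.length ≤ fuel →
    flat3 (zipLongest3 fuel a [] []) = a := by
  intro fuel
  induction fuel with
  | zero =>
    intro a h
    have ha : a = [] := by cases a <;> simp_all
    subst ha; simp [zipLongest3, flat3]
  | succ fuel ih =>
    intro a h
    cases a with
    | nil => simp [zipLongest3, flat3]
    | cons x a' =>
      rw [zipLongest3, if_neg (by simp)]
      have hih := ih a' (by simp at h; omega)
      simp only [flat3, List.flatMap_cons, List.tail_cons, List.tail_nil, List.head?_cons,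
        List.head?_nil, Option.toList_some, Option.toList_none] at hih ⊢
      rw [hih]
      simp

theorem flat3_single2 : ∀ (fuel : Nat) (b : List (List (String × Int))), b.length ≤ fuel →
    flat3 (zipLongest3 fuel [] b []) = b := by
  intro fuel
  induction fuel with
  | zero =>
    intro b h
    have hb : b = [] := by cases b <;> simp_all
    subst hb; simp [zipLongest3, flat3]
  | succ fuel ih =>
    intro b h
    cases b with
    | nil => simp [zipLongest3, flat3]
    | cons x b' =>
      rw [zipLongest3, if_neg (by simp)]
      have hih := ih b' (by simp at h; omega)
      simp only [flat3, List.flatMap_cons, List.tail_cons, List.tail_nil, List.head?_cons,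
        List.head?_nil, Option.toList_some, Option.toList_none] at hih ⊢
      rw [hih]
      simp

theorem flat3_single3 : ∀ (fuel : Nat) (c : List (List (String × Int))), c.length ≤ fuel →
    flat3 (zipLongest3 fuel [] [] c) = c := by
  intro fuel
  induction fuel with
  | zero =>
    intro c h
    have hc : c = [] := by cases c <;> simp_all
    subst hc; simp [zipLongest3, flat3]
  | succ fuel ih =>
    intro c h
    cases c with
    | nil => simp [zipLongest3, flat3]
    | cons x c' =>
      rw [zipLongest3, if_neg (by simp)]
      have hih := ih c' (by simp at h; omega)
      simp only [flat3, List.flatMap_cons, List.tail_cons, List.tail_nil, List.head?_cons,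
        List.head?_nil, Option.toList_some, Option.toList_none] at hih ⊢
      rw [hih]
      simp

-- two-source rounds = zip2-flatten then the remainder of the longer
def pairBody (a b : List (List (String × Int))) : List (List (String × Int)) :=
  (a.zip b).flatMap (fun t => [t.1, t.2]) ++ (a.drop (min a.length b.length) ++ b.drop (min a.length b.length))

theorem flat3_pair12 : ∀ (fuel : Nat) (a b : List (List (String × Int))), a.length + b.length ≤ fuel →
    flat3 (zipLongest3 fuel a b []) = pairBody a b := by
  intro fuel
  induction fuel with
  | zero =>
    intro a b h
    have ha : a = [] := by cases a <;> simp_all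
    have hb : b = [] := by cases b <;> simp_all
    subst ha hb; simp [zipLongest3, flat3, pairBody]
  | succ fuel ih =>
    intro a b h
    cases a with
    | nil =>
      rw [flat3_single2 (fuel + 1) b (by simp at h; omega)]
      simp [pairBody]
    | cons x a' =>
      cases b with
      | nil =>
        rw [flat3_single1 (fuel + 1) (x :: a') (by simp at h ⊢; omega)]
        simp [pairBody]
      | cons y b' =>
        rw [zipLongest3, if_neg (by simp)]
        have hih := ih a' b' (by simp at h; omega)
        simp only [flat3, List.flatMap_cons, List.tail_cons, List.tail_nil, List.head?_cons,
          List.head?_nil, Option.toList_some, Option.toList_none, pairBody] at hih ⊢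
        rw [hih]
        simp [Nat.succ_min_succ]

theorem flat3_pair13 : ∀ (fuel : Nat) (a c : List (List (String × Int))), a.length + c.length ≤ fuel →
    flat3 (zipLongest3 fuel a [] c) = pairBody a c := by
  intro fuel
  induction fuel with
  | zero =>
    intro a c h
    have ha : a = [] := by cases a <;> simp_all
    have hc : c = [] := by cases c <;> simp_all
    subst ha hc; simp [zipLongest3, flat3, pairBody]
  | succ fuel ih =>
    intro a c h
    cases a with
    | nil =>
      rw [flat3_single3 (fuel + 1) c (by simp at h; omega)]
      simp [pairBody]
    | cons x a' =>
      cases c with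
      | nil =>
        rw [flat3_single1 (fuel + 1) (x :: a') (by simp at h ⊢; omega)]
        simp [pairBody]
      | cons z c' =>
        rw [zipLongest3, if_neg (by simp)]
        have hih := ih a' c' (by simp at h; omega)
        simp only [flat3, List.flatMap_cons, List.tail_cons, List.tail_nil, List.head?_cons,
          List.head?_nil, Option.toList_some, Option.toList_none, pairBody] at hih ⊢
        rw [hih]
        simp [Nat.succ_min_succ]

theorem flat3_pair23 : ∀ (fuel : Nat) (b c : List (List (String × Int))), b.length + c.length ≤ fuel →
    flat3 (zipLongest3 fuel [] b c) = pairBody b c := by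
  intro fuel
  induction fuel with
  | zero =>
    intro b c h
    have hb : b = [] := by cases b <;> simp_all
    have hc : c = [] := by cases c <;> simp_all
    subst hb hc; simp [zipLongest3, flat3, pairBody]
  | succ fuel ih =>
    intro b c h
    cases b with
    | nil =>
      rw [flat3_single3 (fuel + 1) c (by simp at h; omega)]
      simp [pairBody]
    | cons y b' =>
      cases c with
      | nil =>
        rw [flat3_single2 (fuel + 1) (y :: b') (by simp at h ⊢; omega)]
        simp [pairBody]
      | cons z c' =>
        rw [zipLongest3, if_neg (by simp)]
        have hih := ih b' c' (by simp at h; omega)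
        simp only [flat3, List.flatMap_cons, List.tail_cons, List.tail_nil, List.head?_cons,
          List.head?_nil, Option.toList_some, Option.toList_none, pairBody] at hih ⊢
        rw [hih]
        simp [Nat.succ_min_succ]

-- cons on all three sources commutes with B's staged computation
theorem alt_cons (x y z : List (String × Int)) (a b c : List (List (String × Int))) :
    merge_products_alternating_alt (x :: a) (y :: b) (some (z :: c))
      = x :: y :: z :: merge_products_alternating_alt a b (some c) := by
  simp only [merge_products_alternating_alt, Option.getD_some, List.length_cons,
    Nat.succ_min_succ, List.drop_succ_cons, List.zip_cons_cons, List.flatMap_cons]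
  generalize List.filter (fun l => !l.isEmpty)
      [List.drop (min (min a.length b.length) c.length) a,
       List.drop (min (min a.length b.length) c.length) b,
       List.drop (min (min a.length b.length) c.length) c] = r
  rcases r with _ | ⟨a1, _ | ⟨b1, _ | _⟩⟩ <;> rfl

-- the round-by-round flatten equals B's staged computation
theorem flat3_eq_alt : ∀ (fuel : Nat) (a b c : List (List (String × Int))),
    a.length + b.length + c.length ≤ fuel →
    flat3 (zipLongest3 fuel a b c) = merge_products_alternating_alt a b (some c) := by
  intro fuel
  induction fuel with
  | zero =>
    intro a b c h
    have ha : a = [] := by cases a <;> simp_all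
    have hb : b = [] := by cases b <;> simp_all
    have hc : c = [] := by cases c <;> simp_all
    subst ha hb hc; simp [zipLongest3, flat3, merge_products_alternating_alt]
  | succ fuel ih =>
    intro a b c h
    cases a with
    | nil =>
      cases b with
      | nil =>
        rw [flat3_single3 (fuel + 1) c (by simp at h; omega)]
        simp only [merge_products_alternating_alt, Option.getD_some]
        cases c <;> simp
      | cons y b' =>
        cases c with
        | nil =>
          rw [flat3_single2 (fuel + 1) (y :: b') (by simp at h ⊢; omega)]
          simp [merge_products_alternating_alt]
        | cons z c' =>
          rw [flat3_pair23 (fuel + 1) (y :: b') (z :: c') (by simp at h ⊢; omega)]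
          simp [merge_products_alternating_alt, pairBody]
    | cons x a' =>
      cases b with
      | nil =>
        cases c with
        | nil =>
          rw [flat3_single1 (fuel + 1) (x :: a') (by simp at h ⊢; omega)]
          simp [merge_products_alternating_alt]
        | cons z c' =>
          rw [flat3_pair13 (fuel + 1) (x :: a') (z :: c') (by simp at h ⊢; omega)]
          simp [merge_products_alternating_alt, pairBody]
      | cons y b' =>
        cases c with
        | nil =>
          rw [flat3_pair12 (fuel + 1) (x :: a') (y :: b') (by simp at h ⊢; omega)]
          simp [merge_products_alternating_alt, pairBody]
        | cons z c' =>
          rw [zipLongest3, if_neg (by simp), alt_cons,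
            ← ih a' b' c' (by simp at h; omega)]
          simp [flat3]

-- B only looks at static_products through getD []
theorem alt_getD (e d : List (List (String × Int))) (s : Option (List (List (String × Int)))) :
    merge_products_alternating_alt e d s = merge_products_alternating_alt e d (some (s.getD [])) := by
  cases s <;> rfl

-- ===== VERDICT (by name: the statement is the Claim_ definition above) =====
theorem merge_products_alternating_spec : Claim_equal_merge_products_alternating := by
  intro e d s _
  unfold Spec_merge_products_alternating merge_products_alternating
  rw [alt_getD]
  have h1 := mergeLoopA_eq e d (s.getD [])
    (e.length + d.length + (s.getD []).length) 0 0 0 [] (by omega)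
  have h2 := flat3_eq_alt (e.length + d.length + (s.getD []).length) e d (s.getD []) (by omega)
  simp only [List.drop_zero, List.nil_append] at h1
  rw [h1, h2]
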